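-- pv_equiv track=rewrite | github.com/vikasrai21/seahawk-courier_fullstack | backend/src/services/ocr.local.py | find_after_anchor
-- ===== SOURCE A (Python) =====
-- def find_after_anchor(lines, anchors):
--     if not lines:
--         return ""
--     upper_lines = [line.upper() for line in lines]
--     for idx, line in enumerate(upper_lines):
--         if any(anchor in line for anchor in anchors):
--             for probe in range(idx + 1, min(idx + 7, len(lines))):
--                 candidate = lines[probe].strip()
--                 if len(candidate) < 4:
--                     continue
--                 upper = candidate.upper()
--                 if any(
--                     token in upper
--                     for token in [
--                         "DATE",
--                         "TIME",
--                         "PIN",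
--                         "TRACKON",
--                         "SIGNATURE",
--                         "COPY",
--                         "BRANCH",
--                         "PHONE",
--                         "READTERMS",
--                         "OVERLEAF",
--                         "BOOKING",
--                     ]
--                 ):
--                     continue
--                 return candidate
--     return ""
-- ===== SOURCE B (Python) =====
-- BAD_TOKENS = ("DATE", "TIME", "PIN", "TRACKON", "SIGNATURE", "COPY",
--               "BRANCH", "PHONE", "READTERMS", "OVERLEAF", "BOOKING")
--
--
-- def find_after_anchor(lines, anchors):
--     last_anchor = None
--     for j, line in enumerate(lines):
--         candidate = line.strip()
--         if (last_anchor is not None and last_anchor >= j - 6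
--                 and len(candidate) >= 4
--                 and not any(t in candidate.upper() for t in BAD_TOKENS)):
--             return candidate
--         if any(a in line.upper() for a in anchors):
--             last_anchor = j
--     return ""
-- ===== Notes on version B (the rewrite author's own statement) =====
-- stated objective: alternative
-- what changed: Replaced A's nested scan (for every anchor line, re-probe the next six lines for a valid candidate) by a single linear pass that remembers the index of the most recently seen anchor line and returns the first valid candidate lying within six lines of it.
import Mathlib
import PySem

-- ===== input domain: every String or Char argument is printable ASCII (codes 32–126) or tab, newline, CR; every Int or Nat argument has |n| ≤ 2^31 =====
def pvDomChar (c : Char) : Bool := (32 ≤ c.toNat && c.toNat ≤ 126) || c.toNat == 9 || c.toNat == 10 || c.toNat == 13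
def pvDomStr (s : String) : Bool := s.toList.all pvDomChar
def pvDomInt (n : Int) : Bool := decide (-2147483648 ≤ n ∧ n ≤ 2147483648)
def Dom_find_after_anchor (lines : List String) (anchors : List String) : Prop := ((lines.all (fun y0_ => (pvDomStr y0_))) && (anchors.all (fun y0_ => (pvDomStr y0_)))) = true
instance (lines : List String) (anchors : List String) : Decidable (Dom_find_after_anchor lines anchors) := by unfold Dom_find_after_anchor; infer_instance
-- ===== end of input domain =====

-- B replaces A's rescan of a 6-line window after every anchor line by a single linear pass
-- that remembers the index of the most recent anchor line (objective: alternative).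

-- ===== PORT A =====
def pvTokensA : List String := ["DATE", "TIME", "PIN", "TRACKON", "SIGNATURE", "COPY", "BRANCH", "PHONE", "READTERMS", "OVERLEAF", "BOOKING"]

-- inner 'for probe in range(idx+1, min(idx+7, len(lines)))' loop, over the window slice
def pvProbeA (cands : List String) : Option String :=
  match cands with
  | [] => none
  | s :: rest =>
    let candidate := PySem.Str.strip s
    if PySem.Str.len candidate < 4 then pvProbeA rest
    else if pvTokensA.any (fun token => PySem.Str.isIn token (PySem.Str.upper candidate)) then pvProbeA rest
    else some candidate

-- outer 'for idx, line in enumerate(upper_lines)' loop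
def pvOuterA (lines : List String) (anchors : List String) (uls : List String) (idx : Nat) : String :=
  match uls with
  | [] => ""
  | line :: rest =>
    if anchors.any (fun anchor => PySem.Str.isIn anchor line) then
      match pvProbeA ((lines.drop (idx + 1)).take 6) with
      | some c => c
      | none => pvOuterA lines anchors rest (idx + 1)
    else pvOuterA lines anchors rest (idx + 1)

def find_after_anchor (lines : List String) (anchors : List String) : String :=
  if lines = [] then ""
  else pvOuterA lines anchors (lines.map PySem.Str.upper) 0

-- ===== PORT B =====
def pvBadTokensB : List String := ["DATE", "TIME", "PIN", "TRACKON", "SIGNATURE", "COPY", "BRANCH", "PHONE", "READTERMS", "OVERLEAF", "BOOKING"]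

-- single 'for j, line in enumerate(lines)' loop carrying last_anchor
def pvLoopB (anchors : List String) (rest : List String) (j : Nat) (lastAnchor : Option Nat) : String :=
  match rest with
  | [] => ""
  | line :: rest =>
    let candidate := PySem.Str.strip line
    if (match lastAnchor with | some m => decide (j ≤ m + 6) | none => false)
        && decide (4 ≤ PySem.Str.len candidate)
        && !(pvBadTokensB.any (fun t => PySem.Str.isIn t (PySem.Str.upper candidate))) then
      candidate
    else
      pvLoopB anchors rest (j + 1)
        (if anchors.any (fun a => PySem.Str.isIn a (PySem.Str.upper line)) then some j else lastAnchor)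

def find_after_anchor_alt (lines : List String) (anchors : List String) : String :=
  pvLoopB anchors lines 0 none

-- ===== PRECONDITION & SPEC =====
def Spec_find_after_anchor (lines : List String) (anchors : List String) (out : String) : Prop := out = find_after_anchor_alt lines anchors
instance (lines : List String) (anchors : List String) (out : String) : Decidable (Spec_find_after_anchor lines anchors out) := by unfold Spec_find_after_anchor; infer_instance

-- ===== CLAIM (what is proved, stated in full; the proofs are below) =====
def Claim_equal_find_after_anchor : Prop := ∀ (lines : List String) (anchors : List String), Dom_find_after_anchor lines anchors → Spec_find_after_anchor lines anchors (find_after_anchor lines anchors)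

-- ===== LEMMAS AND PROOFS =====

-- proof-side vocabulary
def pvValid (s : String) : Bool :=
  !(PySem.Str.len (PySem.Str.strip s) < 4)
    && !(pvTokensA.any (fun token => PySem.Str.isIn token (PySem.Str.upper (PySem.Str.strip s))))

def pvAnchorAt (L : List String) (anchors : List String) (i : Nat) : Bool :=
  anchors.any (fun a => PySem.Str.isIn a (PySem.Str.upper (L.getD i "")))

-- "line j is a valid candidate and some anchor line sits in the 6 lines before it,
--  counting only anchors at index ≥ idx"
def pvGoodFrom (L : List String) (anchors : List String) (idx j : Nat) : Bool :=
  pvValid (L.getD j "")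
    && ((List.range j).any fun i => decide (idx ≤ i) && pvAnchorAt L anchors i && decide (j ≤ i + 6))

def pvOut (L : List String) (o : Option Nat) : String :=
  match o with
  | some j => PySem.Str.strip (L.getD j "")
  | none => ""

theorem pvProbeA_eq_find? (cands : List String) :
    pvProbeA cands = (cands.find? pvValid).map PySem.Str.strip := by
  induction cands with
  | nil => rfl
  | cons s rest ih =>
    by_cases h1 : (PySem.Chars.strip s.toList).length < 4
    · simp [pvProbeA, pvValid, h1, ih]
    · by_cases h2 : ∃ x ∈ pvTokensA, PySem.Chars.isIn x.toList (PySem.Chars.upper (PySem.Chars.strip s.toList)) = true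
      · simp [pvProbeA, pvValid, h1, h2, ih]
      · have h2' : (pvTokensA.any fun token => PySem.Chars.isIn token.toList (PySem.Chars.upper (PySem.Chars.strip s.toList))) = false := by
          simpa using h2
        simp [pvProbeA, pvValid, h1, h2']

theorem pvFind?_range'_eq_some (s n j : Nat) (p : Nat → Bool) :
    (List.range' s n).find? p = some j ↔
      (s ≤ j ∧ j < s + n ∧ p j = true ∧ ∀ k, s ≤ k → k < j → p k = false) := by
  rw [List.find?_eq_some_iff_getElem]
  constructor
  · rintro ⟨hpj, i, hi, hji, hmin⟩
    simp only [List.length_range'] at hi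
    simp only [List.getElem_range'] at hji
    subst hji
    refine ⟨by omega, by omega, hpj, ?_⟩
    intro k hk1 hk2
    have := hmin (k - s) (by omega)
    simp only [List.getElem_range'] at this
    have hk : s + 1 * (k - s) = k := by omega
    rw [hk] at this
    simpa using this
  · rintro ⟨h1, h2, hpj, hmin⟩
    refine ⟨hpj, j - s, by simp [List.length_range']; omega, by simp [List.getElem_range']; omega, ?_⟩
    intro k hk
    have hpk := hmin (s + k) (by omega) (by omega)
    simp [List.getElem_range', hpk]

theorem pvFind?_congr (l : List Nat) (p q : Nat → Bool) (h : ∀ a ∈ l, p a = q a) :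
    l.find? p = l.find? q := by
  induction l with
  | nil => rfl
  | cons a l ih =>
    simp only [List.find?_cons, h a (by simp)]
    cases q a <;> simp [ih (fun b hb => h b (by simp [hb]))]

-- the window slice, read as a find? over its index range
theorem pvWindow_find (L : List String) (m j : Nat) :
    ((L.drop j).take m).find? pvValid =
      ((List.range' j (min m (L.length - j))).find? (fun j' => pvValid (L.getD j' ""))).map
        (fun j' => L.getD j' "") := by
  induction m generalizing j with
  | zero => simp
  | succ m ih =>
    by_cases hj : j < L.length
    · rw [List.drop_eq_getElem_cons hj]
      have hmin : min (m + 1) (L.length - j) = min m (L.length - (j + 1)) + 1 := by omega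
      rw [hmin, List.range'_succ]
      simp only [List.take_succ_cons, List.find?_cons]
      have hg : L.getD j "" = L[j] := List.getD_eq_getElem L "" hj
      rw [hg]
      cases hpv : pvValid L[j]
      · simpa using ih (j + 1)
      · simp [List.getElem?_eq_getElem hj]
    · have h1 : L.drop j = [] := List.drop_eq_nil_of_le (by omega)
      have h2 : min (m + 1) (L.length - j) = 0 := by omega
      rw [h1, h2]
      simp

-- stepping idx by one does not change pvGoodFrom at j unless j is a valid candidate
-- covered exactly by an anchor at idx
theorem pvGoodFrom_succ (L anchors : List String) (idx j : Nat)
    (h : pvAnchorAt L anchors idx = true → pvValid (L.getD j "") = true →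
      ¬(idx < j ∧ j ≤ idx + 6)) :
    pvGoodFrom L anchors idx j = pvGoodFrom L anchors (idx + 1) j := by
  unfold pvGoodFrom
  rw [Bool.eq_iff_iff]
  simp only [Bool.and_eq_true, List.any_eq_true, List.mem_range, decide_eq_true_eq]
  constructor
  · rintro ⟨hv, i, hij, ⟨hidx, ha⟩, hw⟩
    refine ⟨hv, i, hij, ⟨?_, ha⟩, hw⟩
    rcases Nat.eq_or_lt_of_le hidx with he | hl
    · exfalso
      subst he
      exact h ha hv ⟨hij, hw⟩
    · omega
  · rintro ⟨hv, i, hij, ⟨hidx, ha⟩, hw⟩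
    exact ⟨hv, i, hij, ⟨by omega, ha⟩, hw⟩

theorem pvOuterA_spec (L anchors : List String) :
    ∀ (uls : List String) (idx : Nat), uls = (L.map PySem.Str.upper).drop idx →
      pvOuterA L anchors uls idx =
        pvOut L ((List.range L.length).find? (pvGoodFrom L anchors idx)) := by
  intro uls
  induction uls with
  | nil =>
    intro idx heq
    have hn : L.length ≤ idx := by
      by_contra hlt
      rw [List.drop_eq_getElem_cons (by simpa using Nat.lt_of_not_le hlt)] at heq
      exact absurd heq.symm (by simp)
    have hnone : (List.range L.length).find? (pvGoodFrom L anchors idx) = none := by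
      apply List.find?_eq_none.mpr
      intro j hj
      simp only [List.mem_range] at hj
      simp only [pvGoodFrom, Bool.and_eq_true, List.any_eq_true, List.mem_range,
        decide_eq_true_eq, not_and]
      rintro - ⟨i, hij, ⟨hidx, -⟩, -⟩
      omega
    simp [pvOuterA, hnone, pvOut]
  | cons line rest ih =>
    intro idx heq
    have hidx : idx < L.length := by
      by_contra hge
      rw [List.drop_eq_nil_of_le (by simpa using Nat.le_of_not_lt hge)] at heq
      exact absurd heq (by simp)
    have hdrop := List.drop_eq_getElem_cons (l := L.map PySem.Str.upper) (i := idx)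
      (by simpa using hidx)
    rw [hdrop] at heq
    have hline : line = PySem.Str.upper (L.getD idx "") := by
      have := heq.symm
      simp only [List.cons.injEq] at this
      rw [← this.1]
      simp [List.getElem?_eq_getElem hidx]
    have hrest : rest = (L.map PySem.Str.upper).drop (idx + 1) := by
      have := heq.symm
      simp only [List.cons.injEq] at this
      exact this.2.symm
    have hanch : (anchors.any fun anchor => PySem.Str.isIn anchor line) = pvAnchorAt L anchors idx := by
      rw [hline]; rfl
    show (if anchors.any (fun anchor => PySem.Str.isIn anchor line) then _ else _) = _
    rw [hanch]
    by_cases ha : pvAnchorAt L anchors idx = true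
    · rw [if_pos ha]
      have hw := pvWindow_find L 6 (idx + 1)
      rw [pvProbeA_eq_find?, hw]
      set w := min 6 (L.length - (idx + 1)) with hwdef
      cases hf : (List.range' (idx + 1) w).find? (fun j' => pvValid (L.getD j' "")) with
      | some jstar =>
        rw [pvFind?_range'_eq_some] at hf
        obtain ⟨hj1, hj2, hj3, hj4⟩ := hf
        have hgood : (List.range L.length).find? (pvGoodFrom L anchors idx) = some jstar := by
          rw [List.range_eq_range', pvFind?_range'_eq_some]
          refine ⟨by omega, by simp; omega, ?_, ?_⟩
          · simp only [pvGoodFrom, Bool.and_eq_true, List.any_eq_true, List.mem_range,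
              decide_eq_true_eq]
            exact ⟨hj3, idx, by omega, ⟨le_refl idx, ha⟩, by omega⟩
          · intro k hk0 hk
            simp only [pvGoodFrom, Bool.and_eq_false_iff]
            by_cases hvk : pvValid (L.getD k "") = true
            · right
              simp only [List.any_eq_false, List.mem_range, Bool.and_eq_true, decide_eq_true_eq,
                not_and]
              rintro i hik ⟨h1, h2⟩ h3
              -- k is covered by an anchor i ≥ idx, so idx < k and k ≤ i+6; also k < jstar
              -- hence k lies in the window and pvValid (L.getD k "") = false — contradiction
              have hvk' : pvValid (L.getD k "") = false := hj4 k (by omega) (by omega)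
              exact Bool.false_ne_true (hvk'.symm.trans hvk)
            · left
              simpa using hvk
        simp [hgood, pvOut]
      | none =>
        have hred : Option.map PySem.Str.strip
            (Option.map (fun j' => L.getD j' "") (none : Option Nat)) = none := rfl
        rw [hred]
        show pvOuterA L anchors rest (idx + 1) = _
        rw [ih (idx + 1) hrest]
        have hcong : (List.range L.length).find? (pvGoodFrom L anchors idx) =
            (List.range L.length).find? (pvGoodFrom L anchors (idx + 1)) := by
          apply pvFind?_congr
          intro j hj
          simp only [List.mem_range] at hj
          apply pvGoodFrom_succ
          intro _ hv
          rintro ⟨hlt, hle⟩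
          have hj' : j ∈ List.range' (idx + 1) w := by
            rw [List.mem_range'_1]
            omega
          have hmem : pvValid (L.getD j "") = false := by
            simpa using List.find?_eq_none.mp hf j hj'
          exact Bool.false_ne_true (hmem.symm.trans hv)
        rw [hcong]
    · rw [if_neg ha]
      rw [ih (idx + 1) hrest]
      have hcong : (List.range L.length).find? (pvGoodFrom L anchors idx) =
          (List.range L.length).find? (pvGoodFrom L anchors (idx + 1)) := by
        apply pvFind?_congr
        intro j hj
        apply pvGoodFrom_succ
        intro ha' _
        exact absurd ha' (by simpa using ha)
      rw [hcong]

theorem pvLoopB_spec (L anchors : List String) :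
    ∀ (rest : List String) (j : Nat) (lastAnchor : Option Nat), rest = L.drop j →
      (match lastAnchor with
       | none => ∀ i, i < j → pvAnchorAt L anchors i = false
       | some m => m < j ∧ pvAnchorAt L anchors m = true ∧
           ∀ i, m < i → i < j → pvAnchorAt L anchors i = false) →
      pvLoopB anchors rest j lastAnchor =
        pvOut L ((List.range' j (L.length - j)).find? (pvGoodFrom L anchors 0)) := by
  intro rest
  induction rest with
  | nil =>
    intro j last heq hinv
    have hn : L.length ≤ j := by
      by_contra hlt
      have hjl : j < L.length := by omega
      rw [List.drop_eq_getElem_cons hjl] at heq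
      exact absurd heq.symm (List.cons_ne_nil _ _)
    have hz : L.length - j = 0 := by omega
    rw [hz]
    simp [pvLoopB, pvOut]
  | cons line rest ih =>
    intro j last heq hinv
    have hj : j < L.length := by
      by_contra hge
      rw [List.drop_eq_nil_of_le (Nat.le_of_not_lt hge)] at heq
      exact absurd heq (by simp)
    have hdrop := List.drop_eq_getElem_cons (l := L) (i := j) hj
    rw [hdrop] at heq
    simp only [List.cons.injEq] at heq
    have hgd : L.getD j "" = line := by
      rw [List.getD_eq_getElem L "" hj]
      exact heq.1.symm
    have hgd2 : L[j]?.getD "" = line := by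
      rw [← List.getD_eq_getElem?_getD]
      exact hgd
    have hrest : rest = L.drop (j + 1) := heq.2
    have hlen : L.length - j = (L.length - (j + 1)) + 1 := by omega
    rw [hlen, List.range'_succ]
    cases last with
    | none =>
      have hinv' : ∀ i, i < j → pvAnchorAt L anchors i = false := hinv
      have hcond : ((false : Bool)
            && decide (4 ≤ PySem.Str.len (PySem.Str.strip line))
            && !(pvBadTokensB.any (fun t => PySem.Str.isIn t (PySem.Str.upper (PySem.Str.strip line))))) =
          pvGoodFrom L anchors 0 j := by
        have hany : ((List.range j).any fun i => decide (0 ≤ i) && pvAnchorAt L anchors i && decide (j ≤ i + 6)) = false := by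
          apply List.any_eq_false.mpr
          intro i hi
          simp only [List.mem_range] at hi
          simp [hinv' i hi]
        simp only [pvGoodFrom]
        rw [hany]
        simp
      simp only [pvLoopB]
      rw [hcond]
      by_cases hg : pvGoodFrom L anchors 0 j = true

      · rw [if_pos hg, List.find?_cons, hg]
        simp [pvOut, hgd2]
      · rw [if_neg hg, List.find?_cons]
        rw [Bool.not_eq_true] at hg
        rw [hg]
        have hanchj : (anchors.any fun a => PySem.Str.isIn a (PySem.Str.upper line)) =
            pvAnchorAt L anchors j := by
          simp [pvAnchorAt, hgd2]
        rw [hanchj]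
        cases hAj : pvAnchorAt L anchors j with
        | true =>
          rw [if_pos rfl]
          exact ih (j + 1) (some j) hrest ⟨by omega, hAj, by omega⟩
        | false =>
          rw [if_neg (by simp)]
          apply ih (j + 1) none hrest
          intro i hi
          rcases Nat.lt_or_ge i j with h | h
          · exact hinv' i h
          · have hij : i = j := by omega
            rw [hij]; exact hAj
    | some m =>
      obtain ⟨hmj, hma, hmax⟩ := hinv
      have hcond : ((decide (j ≤ m + 6))
            && decide (4 ≤ PySem.Str.len (PySem.Str.strip line))
            && !(pvBadTokensB.any (fun t => PySem.Str.isIn t (PySem.Str.upper (PySem.Str.strip line))))) =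
          pvGoodFrom L anchors 0 j := by
        have hwin : (decide (j ≤ m + 6)) =
            ((List.range j).any fun i => decide (0 ≤ i) && pvAnchorAt L anchors i && decide (j ≤ i + 6)) := by
          rw [Bool.eq_iff_iff]
          simp only [List.any_eq_true, List.mem_range, Bool.and_eq_true, decide_eq_true_eq]
          constructor
          · intro hle
            exact ⟨m, hmj, ⟨⟨by omega, hma⟩, hle⟩⟩
          · rintro ⟨i, hij, ⟨-, hai⟩, hw⟩
            have him : i ≤ m := by
              by_contra hgt
              exact absurd hai (by simp [hmax i (by omega) hij])
            omega
        rw [hwin]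
        simp only [pvGoodFrom, pvValid, hgd]
        have htok : pvBadTokensB = pvTokensA := rfl
        rw [htok, Bool.eq_iff_iff]
        simp only [Bool.and_eq_true, Bool.not_eq_true', decide_eq_true_eq, List.any_eq_false,
          decide_eq_false_iff_not]
        constructor
        · rintro ⟨⟨hany, h4⟩, hbad⟩
          exact ⟨⟨by omega, hbad⟩, hany⟩
        · rintro ⟨⟨h4, hbad⟩, hany⟩
          exact ⟨⟨hany, by omega⟩, hbad⟩
      simp only [pvLoopB]
      rw [hcond]
      by_cases hg : pvGoodFrom L anchors 0 j = true

      · rw [if_pos hg, List.find?_cons, hg]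
        simp [pvOut, hgd2]
      · rw [if_neg hg, List.find?_cons]
        rw [Bool.not_eq_true] at hg
        rw [hg]
        have hanchj : (anchors.any fun a => PySem.Str.isIn a (PySem.Str.upper line)) =
            pvAnchorAt L anchors j := by
          simp [pvAnchorAt, hgd2]
        rw [hanchj]
        cases hAj : pvAnchorAt L anchors j with
        | true =>
          rw [if_pos rfl]
          exact ih (j + 1) (some j) hrest ⟨by omega, hAj, by omega⟩
        | false =>
          rw [if_neg (by simp)]
          apply ih (j + 1) (some m) hrest
          refine ⟨by omega, hma, ?_⟩
          intro i h1 h2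
          rcases Nat.lt_or_ge i j with h | h
          · exact hmax i h1 h
          · have hij : i = j := by omega
            rw [hij]; exact hAj

-- ===== VERDICT (by name: the statement is the Claim_ definition above) =====
theorem find_after_anchor_spec : Claim_equal_find_after_anchor := by
  intro lines anchors _
  unfold Spec_find_after_anchor find_after_anchor find_after_anchor_alt
  have hB := pvLoopB_spec lines anchors lines 0 none (by simp) (by intro i hi; omega)
  by_cases h : lines = []
  · subst h; simp [pvLoopB]
  · rw [if_neg h, hB, pvOuterA_spec lines anchors (lines.map PySem.Str.upper) 0 (by simp),
      List.range_eq_range']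
    simp
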